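-- pv_equiv track=rewrite | github.com/bicknest/coding_interview_problems | greedy_algorithms/sum_of_three/python/sum_of_three.py | generate_sums
-- ===== SOURCE A (Python) =====
-- def generate_sums(nums):
--     sums = dict()
--     for i in range(len(nums)):
--         for j in range(len(nums)):
--             a = nums[i]
--             b = nums[j]
--             if sums.get((b, a)) is None:
--                 sums[(a, b)] = a + b
--     return sums
-- ===== SOURCE B (Python) =====
-- def generate_sums(nums):
--     # distinct values in first-appearance order
--     vals = []
--     for x in nums:
--         if x not in vals:
--             vals.append(x)
--     # upper-triangular pass: pair each value with itself and every later value
--     sums = {}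
--     rest = vals
--     while rest:
--         a = rest[0]
--         for b in rest:
--             sums[(a, b)] = a + b
--         rest = rest[1:]
--     return sums
-- ===== Notes on version B (the rewrite author's own statement) =====
-- stated objective: faster
-- what changed: A runs a full O(n^2) double loop over all list positions with a reverse-key dict lookup per pair; B first deduplicates to the m distinct values in first-appearance order and then fills the upper triangle (each value with itself and every later value) directly, with no lookups and no skipped reversed pairs.
import Mathlib
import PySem

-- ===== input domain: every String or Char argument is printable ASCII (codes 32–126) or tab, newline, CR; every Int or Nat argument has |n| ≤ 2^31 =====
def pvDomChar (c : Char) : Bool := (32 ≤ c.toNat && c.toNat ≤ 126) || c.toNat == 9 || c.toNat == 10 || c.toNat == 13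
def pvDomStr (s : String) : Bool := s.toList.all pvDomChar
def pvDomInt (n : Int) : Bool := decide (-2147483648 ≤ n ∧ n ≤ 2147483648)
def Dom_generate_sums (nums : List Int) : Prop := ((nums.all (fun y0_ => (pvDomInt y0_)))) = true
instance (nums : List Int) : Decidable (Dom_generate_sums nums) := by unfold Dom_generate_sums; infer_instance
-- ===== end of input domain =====

-- B builds the distinct values once and fills the upper triangle directly, instead of
-- A's full double loop over all positions with a reverse-key dict lookup per pair.

-- ===== PORT A =====
-- Python dict {(a,b): a+b} is PySem.Dict (Int × Int) Int; returned as (a, b, a+b) triples.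
def generate_sums (nums : List Int) : List (Int × Int × Int) :=
  let sums : PySem.Dict (Int × Int) Int :=
    nums.foldl (fun sums a =>
      nums.foldl (fun sums b =>
        if sums.get? (b, a) = none then sums.insert (a, b) (a + b) else sums) sums)
      PySem.Dict.empty
  sums.items.map (fun p => (p.1.1, p.1.2, p.2))

-- ===== PORT B =====
-- the 'while rest:' loop of Source B: one row of the triangle, then rest = rest[1:]
def altRows (rest : List Int) (sums : PySem.Dict (Int × Int) Int) : PySem.Dict (Int × Int) Int :=
  match rest with
  | [] => sums
  | a :: tl => altRows tl ((a :: tl).foldl (fun s b => s.insert (a, b) (a + b)) sums)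

def generate_sums_alt (nums : List Int) : List (Int × Int × Int) :=
  let vals : List Int := nums.foldl (fun acc x => if acc.contains x then acc else acc ++ [x]) []
  let sums := altRows vals PySem.Dict.empty
  sums.items.map (fun p => (p.1.1, p.1.2, p.2))

-- ===== PRECONDITION & SPEC =====
def Spec_generate_sums (nums : List Int) (out : List (Int × Int × Int)) : Prop := out = generate_sums_alt nums
instance (nums : List Int) (out : List (Int × Int × Int)) : Decidable (Spec_generate_sums nums out) := by unfold Spec_generate_sums; infer_instance

-- ===== CLAIM (what is proved, stated in full; the proofs are below) =====
def Claim_equal_generate_sums : Prop := ∀ (nums : List Int), Dom_generate_sums nums → Spec_generate_sums nums (generate_sums nums)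

-- ===== LEMMAS AND PROOFS =====

-- one row of the triangle, as dict items
def row (a : Int) (ks : List Int) : List ((Int × Int) × Int) := ks.map (fun b => ((a, b), a + b))

-- the triangle rows for the distinct values P, where the whole distinct list is P ++ S
def rowsOf : List Int → List Int → List ((Int × Int) × Int)
  | [], _ => []
  | a :: tl, S => row a (a :: (tl ++ S)) ++ rowsOf tl S

-- boolean key membership of (x, y) in rowsOf P S
def keyB : List Int → List Int → Int → Int → Bool
  | [], _, _, _ => false
  | a :: tl, S, x, y => (x == a && (a :: (tl ++ S)).contains y) || keyB tl S x y

lemma get?_mk_append (l1 l2 : List ((Int × Int) × Int)) (k : Int × Int) :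
    (PySem.Dict.mk (l1 ++ l2)).get? k =
      ((PySem.Dict.mk l1).get? k).orElse (fun _ => (PySem.Dict.mk l2).get? k) := by
  simp only [PySem.Dict.get?, List.find?_append]
  cases List.find? (fun p => p.1 == k) l1 <;> simp [Option.orElse]
lemma get?_row (a : Int) (ks : List Int) (x y : Int) :
    (PySem.Dict.mk (row a ks)).get? (x, y) = if x = a ∧ y ∈ ks then some (a + y) else none := by
  induction ks with
  | nil => simp [row, PySem.Dict.get?]
  | cons b ks ih =>
    simp only [row, List.map_cons]
    rw [PySem.Dict.get?_mk_cons]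
    by_cases hx : x = a
    · by_cases hy : y = b
      · subst hx; subst hy; simp
      · have : ((a, b) == (x, y)) = false := by
          simp only [beq_eq_false_iff_ne, ne_eq, Prod.mk.injEq, not_and]
          intro _ h2; exact hy h2.symm
        rw [this]; simp only [row] at ih; rw [ih]
        subst hx; simp [hy]
    · have : ((a, b) == (x, y)) = false := by
        simp only [beq_eq_false_iff_ne, ne_eq, Prod.mk.injEq, not_and]
        intro h1; exact absurd h1.symm hx
      rw [this]; simp only [row] at ih; rw [ih]
      simp [hx]
lemma get?_rowsOf (P S : List Int) (x y : Int) :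
    (PySem.Dict.mk (rowsOf P S)).get? (x, y) = if keyB P S x y then some (x + y) else none := by
  induction P with
  | nil => simp [rowsOf, keyB, PySem.Dict.get?]
  | cons a tl ih =>
    show (PySem.Dict.mk (row a (a :: (tl ++ S)) ++ rowsOf tl S)).get? (x, y) = _
    rw [get?_mk_append, get?_row, ih]
    by_cases h1 : x = a ∧ y ∈ a :: (tl ++ S)
    · have hkey : keyB (a :: tl) S x y = true := by
        rw [keyB, Bool.or_eq_true, Bool.and_eq_true]
        exact Or.inl ⟨beq_iff_eq.mpr h1.1, by
          simp only [List.contains_eq_mem, decide_eq_true_eq]; exact h1.2⟩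
      rw [if_pos h1, if_pos hkey]
      simp [Option.orElse, h1.1]
    · have hfalse : (x == a && (a :: (tl ++ S)).contains y) = false := by
        cases h : (x == a && (a :: (tl ++ S)).contains y)
        · rfl
        · exfalso
          rw [Bool.and_eq_true] at h
          exact h1 ⟨beq_iff_eq.mp h.1, by
            simpa only [List.contains_eq_mem, decide_eq_true_eq] using h.2⟩
      rw [if_neg h1, keyB, hfalse, Bool.false_or]
      cases hk : keyB tl S x y <;> simp [Option.orElse]
lemma keyB_fst_mem {P S : List Int} {x y : Int} (h : keyB P S x y = true) : x ∈ P := by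
  induction P with
  | nil => simp [keyB] at h
  | cons a tl ih =>
    simp only [keyB, Bool.or_eq_true, Bool.and_eq_true, beq_iff_eq] at h
    rcases h with ⟨h1, _⟩ | h2
    · exact h1 ▸ List.mem_cons_self ..
    · exact List.mem_cons_of_mem _ (ih h2)

lemma keyB_of_mem {P S : List Int} {x y : Int} (hx : x ∈ P) (hy : y ∈ P ++ S)
    (hk : keyB P S y x = false) : keyB P S x y = true := by
  induction P with
  | nil => simp at hx
  | cons c tl ih =>
    rw [keyB, Bool.or_eq_true, Bool.and_eq_true]
    rw [keyB, Bool.or_eq_false_iff, Bool.and_eq_false_iff] at hk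
    obtain ⟨hk1, hk2⟩ := hk
    rcases List.mem_cons.mp hx with rfl | hx'
    · left
      refine ⟨beq_iff_eq.mpr rfl, ?_⟩
      simp only [List.contains_eq_mem, decide_eq_true_eq]
      simpa [List.cons_append] using hy
    · rcases hk1 with hyc | hcx
      · right
        refine ih hx' ?_ hk2
        have hy2 : y ∈ c :: (tl ++ S) := by simpa [List.cons_append] using hy
        rcases List.mem_cons.mp hy2 with rfl | h
        · simp at hyc
        · exact h
      · exfalso
        have : x ∈ c :: (tl ++ S) := List.mem_cons_of_mem _ (List.mem_append_left _ hx')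
        simp only [List.contains_eq_mem, decide_eq_false_iff_not] at hcx
        exact hcx this
lemma keyB_self_right {P S' : List Int} {a b : Int} (hb : b ∈ P) : keyB P (a :: S') b a = true := by
  induction P with
  | nil => simp at hb
  | cons c tl ih =>
    simp only [keyB, Bool.or_eq_true, Bool.and_eq_true, beq_iff_eq]
    rcases List.mem_cons.mp hb with rfl | hb'
    · left
      refine ⟨rfl, ?_⟩
      simp only [List.contains_eq_mem, decide_eq_true_eq]
      exact List.mem_cons_of_mem _ (List.mem_append_right _ (List.mem_cons_self ..))
    · right; exact ih hb' 

lemma pv_disj {α : Type} {l1 l2 : List α} (h : (l1 ++ l2).Nodup) {x : α}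
    (h1 : x ∈ l1) (h2 : x ∈ l2) : False :=
  (List.disjoint_of_nodup_append h) h1 h2

lemma fst_mem_of_mem_keys : ∀ {P S : List Int} {k : Int × Int},
    k ∈ (rowsOf P S).map Prod.fst → k.1 ∈ P := by
  intro P
  induction P with
  | nil => intro S k h; simp [rowsOf] at h
  | cons a tl ih =>
    intro S k h
    simp only [rowsOf, List.map_append, List.mem_append] at h
    rcases h with h | h
    · simp only [row, List.map_map, List.mem_map] at h
      obtain ⟨b, _, rfl⟩ := h
      exact List.mem_cons_self ..
    · exact List.mem_cons_of_mem _ (ih h)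

lemma nodup_keys_rowsOf {P S : List Int} (h : (P ++ S).Nodup) :
    ((rowsOf P S).map Prod.fst).Nodup := by
  induction P with
  | nil => simp [rowsOf]
  | cons a tl ih =>
    have h' : (a :: (tl ++ S)).Nodup := by simpa using h
    simp only [rowsOf, List.map_append]
    rw [List.nodup_append]
    refine ⟨?_, ih (List.Nodup.of_cons h'), ?_⟩
    · rw [row, List.map_map]
      exact h'.map (by intro b1 b2 hh; simpa using hh)
    · intro k hk1 k2 hk2
      simp only [row, List.map_map, List.mem_map] at hk1
      obtain ⟨b, _, rfl⟩ := hk1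
      have h2 := fst_mem_of_mem_keys hk2
      intro heq
      rw [← heq] at h2
      exact (List.nodup_cons.mp h').1 (List.mem_append_left _ h2)

lemma nodup_keys_inv {P S' F : List Int} {a : Int} (hn : (P ++ a :: S').Nodup)
    (hF : F.Nodup) :
    (((rowsOf P (a :: S') ++ row a F)).map Prod.fst).Nodup := by
  have haP : a ∉ P := fun hmem => pv_disj hn hmem (List.mem_cons_self ..)
  rw [List.map_append, List.nodup_append]
  refine ⟨nodup_keys_rowsOf hn, ?_, ?_⟩
  · rw [row, List.map_map]
    exact hF.map (by intro b1 b2 hh; simpa using hh)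
  · intro k hk1 k2 hk2
    have h1 := fst_mem_of_mem_keys hk1
    simp only [row, List.map_map, List.mem_map] at hk2
    obtain ⟨b, _, rfl⟩ := hk2
    intro heq
    rw [heq] at h1
    exact haP h1

lemma insert_self_eq {d : PySem.Dict (Int × Int) Int} {k : Int × Int} {v : Int}
    (h : d.get? k = some v) (hnd : d.keys.Nodup) : d.insert k v = d := by
  have hc : d.contains k = true := by
    cases hcc : d.contains k
    · rw [(PySem.Dict.get?_eq_none_iff_contains d k).mpr hcc] at h; exact absurd h (by simp)
    · rfl
  apply PySem.Dict.ext
  rw [PySem.Dict.items_insert_of_contains d v hc]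
  have hpt : ∀ p ∈ d.items, (if (p.1 == k) = true then (k, v) else p) = p := by
    intro p hp
    by_cases hpk : (p.1 == k) = true
    · have hk1 : p.1 = k := beq_iff_eq.mp hpk
      have h2 : d.get? p.1 = some p.2 :=
        PySem.Dict.get?_of_mem_items d (by simpa using hp) hnd
      rw [hk1, h] at h2
      have hv : v = p.2 := Option.some.inj h2
      rw [if_pos hpk]
      exact Prod.ext_iff.mpr ⟨hk1.symm, hv⟩
    · rw [if_neg hpk]
  exact (List.map_congr_left hpt).trans (List.map_id _)

lemma rowsOf_snoc (P S' : List Int) (a : Int) :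
    rowsOf (P ++ [a]) S' = rowsOf P (a :: S') ++ row a (a :: S') := by
  induction P with
  | nil => simp [rowsOf]
  | cons c tl ih =>
    simp only [List.cons_append, rowsOf, ih, List.append_assoc, List.singleton_append,
      List.nil_append]

lemma inner_noop (P S : List Int) (a : Int) (hn : (P ++ S).Nodup) (ha : a ∈ P) :
    ∀ (r : List Int) (d : PySem.Dict (Int × Int) Int),
    (∀ b ∈ r, b ∈ P ++ S) → d.items = rowsOf P S →
    (r.foldl (fun s b => if s.get? (b, a) = none then s.insert (a, b) (a + b) else s) d) = d := by
  intro r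
  induction r with
  | nil => intro d _ _; rfl
  | cons b r ih =>
    intro d hmem hd
    have hdm : d = PySem.Dict.mk (rowsOf P S) := PySem.Dict.ext hd
    have hb : b ∈ P ++ S := hmem b (List.mem_cons_self ..)
    have hstep : (if d.get? (b, a) = none then d.insert (a, b) (a + b) else d) = d := by
      rw [hdm, get?_rowsOf]
      by_cases hk : keyB P S b a = true
      · simp [hk]
      · have hk' : keyB P S b a = false := by simpa using hk
        have hk2 : keyB P S a b = true := keyB_of_mem ha hb hk'
        rw [hk']
        simp only [Bool.false_eq_true, if_false, if_pos rfl]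
        refine insert_self_eq ?_ ?_
        · rw [get?_rowsOf, if_pos hk2]
        · show ((PySem.Dict.mk (rowsOf P S)).keys).Nodup
          simpa [PySem.Dict.keys] using nodup_keys_rowsOf hn
    simp only [List.foldl_cons]
    rw [hstep]
    exact ih d (fun c hc => hmem c (List.mem_cons_of_mem _ hc)) hd

lemma inner_new (P S' : List Int) (a : Int) (hn : (P ++ a :: S').Nodup) :
    ∀ (r q : List Int) (d : PySem.Dict (Int × Int) Int),
    (∀ b ∈ r, b ∈ P ++ a :: S') →
    d.items = rowsOf P (a :: S') ++
        row a ((PySem.Set.ofList q).filter (fun b => (a :: S').contains b)) →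
    (r.foldl (fun s b => if s.get? (b, a) = none then s.insert (a, b) (a + b) else s) d).items
      = rowsOf P (a :: S') ++
        row a ((PySem.Set.ofList (q ++ r)).filter (fun b => (a :: S').contains b)) := by
  have haP : a ∉ P := fun hmem => pv_disj hn hmem (List.mem_cons_self ..)
  intro r
  induction r with
  | nil => intro q d _ hd; simpa using hd
  | cons b r ih =>
    intro q d hmem hd
    set F := (PySem.Set.ofList q).filter (fun b => (a :: S').contains b) with hF
    have hdm : d = PySem.Dict.mk (rowsOf P (a :: S') ++ row a F) := PySem.Dict.ext hd
    have hb : b ∈ P ++ a :: S' := hmem b (List.mem_cons_self ..)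
    have hmem' : ∀ c ∈ r, c ∈ P ++ a :: S' := fun c hc => hmem c (List.mem_cons_of_mem _ hc)
    have hFsub : ∀ c ∈ F, c ∈ a :: S' := by
      intro c hc
      have := List.of_mem_filter hc
      simpa [List.contains_eq_mem] using this
    have hFq : ∀ c ∈ F, c ∈ PySem.Set.ofList q := fun c hc => List.mem_of_mem_filter hc
    have hFnd : F.Nodup := (PySem.Set.nodup_ofList q).filter _
    have hget : ∀ x y : Int, d.get? (x, y) =
        ((if keyB P (a :: S') x y then some (x + y) else none).orElse
          (fun _ => if x = a ∧ y ∈ F then some (a + y) else none)) := by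
      intro x y
      rw [hdm, get?_mk_append, get?_rowsOf, get?_row]
    have hofq : PySem.Set.ofList (q ++ [b]) =
        if b ∈ PySem.Set.ofList q then PySem.Set.ofList q else PySem.Set.ofList q ++ [b] := by
      rw [PySem.Set.ofList_append_singleton, PySem.Set.add_eq_ite]
    rw [show q ++ b :: r = (q ++ [b]) ++ r by simp]
    simp only [List.foldl_cons]
    by_cases hbP : b ∈ P
    · have hbS : b ∉ a :: S' := fun h => pv_disj hn hbP h
      have hF' : (PySem.Set.ofList (q ++ [b])).filter (fun c => (a :: S').contains c) = F := by
        rw [hofq]; split_ifs with h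
        · exact hF.symm
        · rw [List.filter_append]
          have hb' : (a :: S').contains b = false := by
            simp only [List.contains_eq_mem, List.mem_cons, decide_eq_false_iff_not, not_or]
            exact ⟨fun h1 => hbS (by simp [h1]), fun h1 => hbS (by simp [h1])⟩
          have hnil : List.filter (fun c => (a :: S').contains c) [b] = [] := by
            rw [List.filter_cons, if_neg (show ¬((a :: S').contains b = true) by
              rw [hb']; simp), List.filter_nil]
          rw [hnil, List.append_nil]
      have hsome : d.get? (b, a) = some (b + a) := by
        rw [hget b a, if_pos (keyB_self_right hbP)]
        simp [Option.orElse]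
      rw [if_neg (by rw [hsome]; simp)]
      exact ih (q ++ [b]) d hmem' (by rw [hF']; exact hd)
    · have hbS : b ∈ a :: S' := (List.mem_append.mp hb).resolve_left hbP
      have hkba : keyB P (a :: S') b a = false := by
        cases h : keyB P (a :: S') b a
        · rfl
        · exact absurd (keyB_fst_mem h) hbP
      have hgba : d.get? (b, a) = (if b = a ∧ a ∈ F then some (a + a) else none) := by
        rw [hget b a, hkba]; simp [Option.orElse]
      have hkab : keyB P (a :: S') a b = false := by
        cases h : keyB P (a :: S') a b
        · rfl
        · exact absurd (keyB_fst_mem h) haP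
      by_cases hcase : b = a ∧ a ∈ F
      · have hbq : b ∈ PySem.Set.ofList q := hcase.1 ▸ hFq a hcase.2
        have hF' : (PySem.Set.ofList (q ++ [b])).filter (fun c => (a :: S').contains c) = F := by
          rw [hofq, if_pos hbq]
        rw [if_neg (by rw [hgba, if_pos hcase]; simp)]
        exact ih (q ++ [b]) d hmem' (by rw [hF']; exact hd)
      · have hnone : d.get? (b, a) = none := by rw [hgba, if_neg hcase]
        rw [if_pos hnone]
        by_cases hbF : b ∈ F
        · have hgab : d.get? (a, b) = some (a + b) := by
            rw [hget a b, hkab]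
            simp [Option.orElse, hbF]
          have hins : d.insert (a, b) (a + b) = d := by
            refine insert_self_eq hgab ?_
            rw [hdm]
            show (((rowsOf P (a :: S') ++ row a F)).map Prod.fst).Nodup
            exact nodup_keys_inv hn hFnd
          have hbq : b ∈ PySem.Set.ofList q := hFq b hbF
          have hF' : (PySem.Set.ofList (q ++ [b])).filter (fun c => (a :: S').contains c) = F := by
            rw [hofq, if_pos hbq]
          rw [hins]
          exact ih (q ++ [b]) d hmem' (by rw [hF']; exact hd)
        · have hbq : b ∉ PySem.Set.ofList q := fun h =>
            hbF (List.mem_filter.mpr ⟨h, by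
              simp only [List.contains_eq_mem, List.mem_cons, decide_eq_true_eq]
              exact List.mem_cons.mp hbS⟩)
          have hF' : (PySem.Set.ofList (q ++ [b])).filter (fun c => (a :: S').contains c)
              = F ++ [b] := by
            rw [hofq, if_neg hbq, List.filter_append]
            have hb' : (a :: S').contains b = true := by
              simp only [List.contains_eq_mem, List.mem_cons, decide_eq_true_eq]
              exact List.mem_cons.mp hbS
            have hone : List.filter (fun c => (a :: S').contains c) [b] = [b] := by
              rw [List.filter_cons, if_pos (show (a :: S').contains b = true from hb'),
                List.filter_nil]
            rw [hone, hF]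
          have hcont : d.contains (a, b) = false := by
            refine (PySem.Dict.get?_eq_none_iff_contains d (a, b)).mp ?_
            rw [hget a b, hkab]
            simp [Option.orElse, hbF]
          refine ih (q ++ [b]) _ hmem' ?_
          rw [PySem.Dict.items_insert_of_not_contains d _ hcont, hd, hF']
          simp [row, List.append_assoc]

lemma outer_loop (nums : List Int) :
    ∀ (r p : List Int) (S : List Int) (d : PySem.Dict (Int × Int) Int),
    nums = p ++ r →
    PySem.Set.ofList nums = PySem.Set.ofList p ++ S →
    d.items = rowsOf (PySem.Set.ofList p) S →
    (r.foldl (fun d a =>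
        nums.foldl (fun s b => if s.get? (b, a) = none then s.insert (a, b) (a + b) else s) d) d).items
      = rowsOf (PySem.Set.ofList nums) [] := by
  intro r
  induction r with
  | nil =>
    intro p S d hsplit hV hd
    rw [List.append_nil] at hsplit
    subst hsplit
    have hS : S = [] := by
      have h2 : PySem.Set.ofList nums ++ [] = PySem.Set.ofList nums ++ S := by
        rw [List.append_nil]; exact hV
      exact (List.append_cancel_left h2).symm
    subst hS
    simpa using hd
  | cons a r' ih =>
    intro p S d hsplit hV hd
    have hsplit' : nums = (p ++ [a]) ++ r' := by rw [hsplit]; simp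
    have hmem : ∀ b ∈ nums, b ∈ PySem.Set.ofList p ++ S := by
      intro b hbn
      rw [← hV]
      exact (PySem.Set.mem_ofList nums b).mpr hbn
    have hnPS : (PySem.Set.ofList p ++ S).Nodup := by
      rw [← hV]; exact PySem.Set.nodup_ofList nums
    simp only [List.foldl_cons]
    by_cases hap : a ∈ p
    · have hone : PySem.Set.ofList (p ++ [a]) = PySem.Set.ofList p := by
        rw [PySem.Set.ofList_append_singleton, PySem.Set.add_eq_ite,
          if_pos ((PySem.Set.mem_ofList p a).mpr hap)]
      rw [inner_noop (PySem.Set.ofList p) S a hnPS ((PySem.Set.mem_ofList p a).mpr hap) nums d hmem hd]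
      exact ih (p ++ [a]) S d hsplit' (by rw [hone]; exact hV) (by rw [hone]; exact hd)
    · have hone : PySem.Set.ofList (p ++ [a]) = PySem.Set.ofList p ++ [a] := by
        rw [PySem.Set.ofList_append_singleton, PySem.Set.add_eq_ite,
          if_neg (fun h => hap ((PySem.Set.mem_ofList p a).mp h))]
      obtain ⟨S'', rfl⟩ : ∃ S'', S = a :: S'' := by
        have h1 : PySem.Set.ofList nums = PySem.Set.ofList (p ++ [a]) ++
            ((PySem.Set.ofList r').filter (fun y => !(PySem.Set.ofList (p ++ [a])).contains y)) := by
          rw [hsplit', PySem.Set.ofList_append, PySem.Set.update_eq_append_filter]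
        rw [hone, List.append_assoc, hV] at h1
        exact ⟨_, List.append_cancel_left h1⟩
      have hd0 : d.items = rowsOf (PySem.Set.ofList p) (a :: S'') ++
          row a ((PySem.Set.ofList []).filter (fun b => (a :: S'').contains b)) := by
        simpa [row] using hd
      have step := inner_new (PySem.Set.ofList p) S'' a hnPS nums [] d hmem hd0
      have hfull : ((PySem.Set.ofList ([] ++ nums)).filter (fun b => (a :: S'').contains b))
          = a :: S'' := by
        rw [List.nil_append, hV, List.filter_append]
        have h1 : (PySem.Set.ofList p).filter (fun b => (a :: S'').contains b) = [] := by
          rw [List.filter_eq_nil_iff]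
          intro c hc
          have hcs : c ∉ a :: S'' := fun hcs => pv_disj hnPS hc hcs
          simpa [List.contains_eq_mem] using hcs
        have h2 : (a :: S'').filter (fun b => (a :: S'').contains b) = a :: S'' := by
          rw [List.filter_eq_self]
          intro c hc
          simpa [List.contains_eq_mem] using hc
        rw [h1, h2, List.nil_append]
      refine ih (p ++ [a]) S'' _ hsplit' ?_ ?_
      · rw [hone, List.append_assoc, List.singleton_append]; exact hV
      · rw [step, hfull, hone, ← rowsOf_snoc]

lemma altRows_items :
    ∀ (rest : List Int) (d : PySem.Dict (Int × Int) Int), rest.Nodup →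
    (∀ p ∈ d.items, p.1.1 ∉ rest) →
    (altRows rest d).items = d.items ++ rowsOf rest [] := by
  intro rest
  induction rest with
  | nil => intro d _ _; simp [altRows, rowsOf]
  | cons a tl ih =>
    intro d hnd hdf
    show (altRows tl ((a :: tl).foldl (fun s b => s.insert (a, b) (a + b)) d)).items = _
    have hfresh : ∀ b ∈ a :: tl, d.contains ((a, b) : Int × Int) = false := by
      intro b hb
      cases h : d.contains (a, b)
      · rfl
      · exfalso
        simp only [PySem.Dict.contains, List.any_eq_true] at h
        obtain ⟨p, hp, hpk⟩ := h
        have h1 : p.1 = (a, b) := beq_iff_eq.mp hpk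
        exact hdf p hp (by rw [h1]; exact List.mem_cons_self ..)
    have hmapnd : ((a :: tl).map (fun b => ((a, b) : Int × Int))).Nodup :=
      hnd.map (by intro b1 b2 hh; simpa using hh)
    have hins := PySem.Dict.items_foldl_insert_fresh (a :: tl)
      (fun b => ((a, b) : Int × Int)) (fun b => a + b) d hfresh hmapnd
    rw [ih ((a :: tl).foldl (fun s b => s.insert (a, b) (a + b)) d) (List.Nodup.of_cons hnd) ?_]
    · rw [hins]
      simp [rowsOf, row, List.append_assoc]
    · intro p hp
      rw [hins] at hp
      rcases List.mem_append.mp hp with hold | hnew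
      · intro hmem; exact hdf p hold (List.mem_cons_of_mem _ hmem)
      · simp only [List.mem_map] at hnew
        obtain ⟨b, _, rfl⟩ := hnew
        exact (List.nodup_cons.mp hnd).1

lemma foldl_dedup (l : List Int) : ∀ s : List Int,
    l.foldl (fun acc x => if acc.contains x then acc else acc ++ [x]) s = PySem.Set.update s l := by
  induction l with
  | nil => intro s; rw [List.foldl_nil, PySem.Set.update_nil]
  | cons x l ihl =>
    intro s
    rw [List.foldl_cons, PySem.Set.update_cons, ihl]
    rfl

lemma vals_eq_ofList (nums : List Int) :
    nums.foldl (fun acc x => if acc.contains x then acc else acc ++ [x]) [] = PySem.Set.ofList nums := by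
  rw [foldl_dedup, PySem.Set.update_nil_left]

-- ===== VERDICT (by name: the statement is the Claim_ definition above) =====
theorem generate_sums_spec : Claim_equal_generate_sums := by
  intro nums _
  show generate_sums nums = generate_sums_alt nums
  have hA : (nums.foldl (fun sums a => nums.foldl (fun sums b =>
        if sums.get? (b, a) = none then sums.insert (a, b) (a + b) else sums) sums)
        (PySem.Dict.empty : PySem.Dict (Int × Int) Int)).items
      = rowsOf (PySem.Set.ofList nums) [] := by
    refine outer_loop nums nums [] (PySem.Set.ofList nums) PySem.Dict.empty rfl ?_ ?_
    · rw [show (PySem.Set.ofList ([] : List Int)) = [] from rfl, List.nil_append]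
    · rfl
  have hB : (altRows (nums.foldl (fun acc x => if acc.contains x then acc else acc ++ [x]) [])
        PySem.Dict.empty).items = rowsOf (PySem.Set.ofList nums) [] := by
    rw [vals_eq_ofList]
    rw [altRows_items (PySem.Set.ofList nums) PySem.Dict.empty (PySem.Set.nodup_ofList nums)
      (by intro p hp; exact absurd hp (List.not_mem_nil))]
    rw [show (PySem.Dict.empty : PySem.Dict (Int × Int) Int).items = [] from rfl, List.nil_append]
  simp only [generate_sums, generate_sums_alt]
  rw [hA, hB]
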